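-- pv_equiv track=rewrite | github.com/MrBrantCode/unitest_baseline | mut_generate/mist_train_cf/cf_44233/solution.py | longest_term
-- ===== SOURCE A (Python) =====
-- def longest_term(terminologies, numerical_symbols):
--     # Convert the string of terms into a list of words/terms
--     terms = terminologies.split()
--     # Convert the string of numerical symbols into a set for more efficient lookup
--     symbols = set(numerical_symbols)
--     longest = ""
--
--     for term in terms:
--         if set(term).issubset(symbols):
--             if len(term) > len(longest):
--                 longest = term
--     return longest
-- ===== SOURCE B (Python) =====
-- def longest_term(terminologies, numerical_symbols):
--     # Sort terms by length, longest first (stable: ties keep original order),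
--     # then return the first term using only allowed symbols.
--     symbols = set(numerical_symbols)
--     for term in sorted(terminologies.split(), key=len, reverse=True):
--         if set(term).issubset(symbols):
--             return term
--     return ""
-- ===== Notes on version B (the rewrite author's own statement) =====
-- stated objective: alternative
-- what changed: Instead of a single pass keeping a running best, B sorts the terms by length in descending stable order and returns the first term whose characters are all allowed (default empty string).
import Mathlib
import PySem

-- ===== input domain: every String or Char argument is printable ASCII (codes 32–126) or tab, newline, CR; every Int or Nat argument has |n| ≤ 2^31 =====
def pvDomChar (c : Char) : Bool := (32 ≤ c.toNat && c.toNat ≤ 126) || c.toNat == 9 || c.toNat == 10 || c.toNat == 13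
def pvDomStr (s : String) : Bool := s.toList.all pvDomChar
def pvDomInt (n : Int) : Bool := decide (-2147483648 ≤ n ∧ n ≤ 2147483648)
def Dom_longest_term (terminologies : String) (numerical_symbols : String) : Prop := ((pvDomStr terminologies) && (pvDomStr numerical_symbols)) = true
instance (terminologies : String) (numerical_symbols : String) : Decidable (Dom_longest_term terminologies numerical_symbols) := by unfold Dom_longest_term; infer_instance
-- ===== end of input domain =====

-- B replaces A's running-best scan by a stable descending length sort followed by a first-valid scan (alternative decomposition, same results).


-- ===== PORT A =====
def longest_term (terminologies : String) (numerical_symbols : String) : String :=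
  let terms := PySem.Str.split₀ terminologies
  let symbols := PySem.Set.ofList numerical_symbols.toList
  let longest := ""
  terms.foldl (fun longest term =>
    if PySem.Set.issubset (PySem.Set.ofList term.toList) symbols then
      if PySem.Str.len longest < PySem.Str.len term then term else longest
    else longest) longest

-- ===== PORT B =====
-- B's loop: return the first term (in the sorted order) made only of allowed symbols, else "".
def ltFirstValid (symbols : PySem.Set Char) : List String → String
  | [] => ""
  | t :: rest =>
    if PySem.Set.issubset (PySem.Set.ofList t.toList) symbols then t
    else ltFirstValid symbols rest

def longest_term_alt (terminologies : String) (numerical_symbols : String) : String :=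
  let symbols := PySem.Set.ofList numerical_symbols.toList
  ltFirstValid symbols (PySem.List.sorted (PySem.Str.split₀ terminologies) PySem.Str.len true)

-- ===== PRECONDITION & SPEC =====
def Spec_longest_term (terminologies : String) (numerical_symbols : String) (out : String) : Prop := out = longest_term_alt terminologies numerical_symbols
instance (terminologies : String) (numerical_symbols : String) (out : String) : Decidable (Spec_longest_term terminologies numerical_symbols out) := by unfold Spec_longest_term; infer_instance

-- ===== CLAIM (what is proved, stated in full; the proofs are below) =====
def Claim_equal_longest_term : Prop := ∀ (terminologies : String) (numerical_symbols : String), Dom_longest_term terminologies numerical_symbols → Spec_longest_term terminologies numerical_symbols (longest_term terminologies numerical_symbols)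

-- ===== LEMMAS AND PROOFS =====

def valid (sym : PySem.Set Char) (t : String) : Bool :=
  PySem.Set.issubset (PySem.Set.ofList t.toList) sym

def ltStep (sym : PySem.Set Char) (longest term : String) : String :=
  if PySem.Set.issubset (PySem.Set.ofList term.toList) sym then
    if PySem.Str.len longest < PySem.Str.len term then term else longest
  else longest

theorem insertBy_split {α : Type} (p : α → α → Bool) (x : α) (s : List α) :
    PySem.List.insertBy p x s =
      s.takeWhile (fun y => !(p x y)) ++ x :: s.dropWhile (fun y => !(p x y)) := by
  induction s with
  | nil => simp [PySem.List.insertBy]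
  | cons y ys ih =>
    by_cases h : p x y = true
    · simp [PySem.List.insertBy, h, List.takeWhile, List.dropWhile]
    · simp only [Bool.not_eq_true] at h
      simp [PySem.List.insertBy, h, List.takeWhile, List.dropWhile, ih]

theorem fv_eq_find? (sym : PySem.Set Char) (l : List String) :
    ltFirstValid sym l = (l.find? (valid sym)).getD "" := by
  induction l with
  | nil => simp [ltFirstValid]
  | cons t r ih =>
    by_cases h : valid sym t = true
    · have h' := h; simp only [valid] at h'
      simp [ltFirstValid, h', List.find?, h]
    · simp only [Bool.not_eq_true] at h
      have h' := h; simp only [valid] at h'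
      simp [ltFirstValid, h', List.find?, h, ih]

theorem takeWhile_append_all {α : Type} (q : α → Bool) (l1 l2 : List α)
    (h : ∀ y ∈ l1, q y = true) :
    (l1 ++ l2).takeWhile q = l1 ++ l2.takeWhile q := by
  induction l1 with
  | nil => simp
  | cons a l ih =>
    simp only [List.cons_append, List.takeWhile, h a (List.mem_cons_self ..)]
    simp [ih (fun y hy => h y (List.mem_cons_of_mem _ hy))]

theorem sorted_snoc (ts : List String) (x : String) :
    PySem.List.sorted (ts ++ [x]) PySem.Str.len true =
      PySem.List.insertBy (fun a b => decide (PySem.Str.len b < PySem.Str.len a)) x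
        (PySem.List.sorted ts PySem.Str.len true) := by
  rw [PySem.List.sorted_rev_eq_foldl_insertBy, PySem.List.sorted_rev_eq_foldl_insertBy,
    List.foldl_append]
  rfl

theorem ltInv (sym : PySem.Set Char) (ts : List String) :
    (∀ y ∈ PySem.List.sorted ts PySem.Str.len true, valid sym y = true →
        PySem.Str.len y ≤ PySem.Str.len (ts.foldl (ltStep sym) "")) ∧
    ltFirstValid sym (PySem.List.sorted ts PySem.Str.len true) = ts.foldl (ltStep sym) "" := by
  induction ts using List.reverseRecOn with
  | nil => simp [PySem.List.sorted, ltFirstValid]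
  | append_singleton ts x ih =>
    obtain ⟨ih1, ih2⟩ := ih
    set s := PySem.List.sorted ts PySem.Str.len true with hs
    set L := ts.foldl (ltStep sym) "" with hL
    have hpw : s.Pairwise (fun a b => PySem.Str.len b ≤ PySem.Str.len a) :=
      PySem.List.sorted_pairwise_rev ts PySem.Str.len
    have hsnoc := sorted_snoc ts x
    rw [← hs] at hsnoc
    have hfold : (ts ++ [x]).foldl (ltStep sym) "" = ltStep sym L x := by
      rw [List.foldl_append]; rfl
    rw [hsnoc, hfold]
    set q : String → Bool := fun y => !(decide (PySem.Str.len y < PySem.Str.len x)) with hq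
    have hsplit : PySem.List.insertBy
        (fun a b => decide (PySem.Str.len b < PySem.Str.len a)) x s =
        s.takeWhile q ++ x :: s.dropWhile q := insertBy_split _ x s
    have hqle : ∀ y, q y = true ↔ PySem.Str.len x ≤ PySem.Str.len y := by
      intro y; simp [hq, not_lt]
    by_cases hvx : valid sym x = true
    · have hvx' := hvx; simp only [valid] at hvx'
      by_cases hlt : PySem.Str.len L < PySem.Str.len x
      · -- x becomes the new best
        have hstep : ltStep sym L x = x := by unfold ltStep; rw [if_pos hvx', if_pos hlt]
        rw [hstep]
        have htwnone : (s.takeWhile q).find? (valid sym) = none := by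
          rw [List.find?_eq_none]
          intro y hy hvy
          have h1 : PySem.Str.len x ≤ PySem.Str.len y :=
            (hqle y).mp (List.mem_takeWhile_imp hy)
          have h2 : PySem.Str.len y ≤ PySem.Str.len L :=
            ih1 y ((List.takeWhile_sublist q).mem hy) hvy
          omega
        constructor
        · intro y hy hvy
          rw [PySem.List.mem_insertBy] at hy
          rcases hy with rfl | hy
          · exact le_refl _
          · exact le_trans (ih1 y hy hvy) (le_of_lt hlt)
        · rw [hsplit, fv_eq_find?, List.find?_append, htwnone]
          exact List.find?_cons_of_pos hvx ▸ by simp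
      · -- x is not longer than the current best L
        have hstep : ltStep sym L x = L := by unfold ltStep; rw [if_pos hvx', if_neg hlt]
        rw [hstep]
        refine ⟨?_, ?_⟩
        · intro y hy hvy
          rw [PySem.List.mem_insertBy] at hy
          rcases hy with rfl | hy
          · omega
          · exact ih1 y hy hvy
        · rw [fv_eq_find?] at ih2 ⊢
          rw [hsplit, List.find?_append]
          rcases hf : s.find? (valid sym) with _ | L'
          · -- no valid term in s : L = "" and x = "" too
            rw [hf] at ih2; simp at ih2
            have hL0 : PySem.Str.len L = 0 := by rw [ih2]; rfl
            have hxz : PySem.Str.len x ≤ 0 := by omega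
            have hx0 : x = "" := by
              rw [PySem.Str.len_eq] at hxz
              have : x.toList.length = 0 := by omega
              have : x.toList = [] := List.length_eq_zero_iff.mp this
              cases x; simp_all
            have htwnone : (s.takeWhile q).find? (valid sym) = none := by
              rw [List.find?_eq_none]
              intro y hy hvy
              exact (List.find?_eq_none.mp hf) y ((List.takeWhile_sublist q).mem hy) hvy
            have hv0 : valid sym x = true := hvx
            rw [htwnone, List.find?_cons_of_pos hv0]
            simp [hx0, ih2]
          · -- first valid in s is L
            have hL' : L' = L := by rw [hf] at ih2; simpa using ih2
            subst hL'
            obtain ⟨hvL, pre, suf, hsd, hpre⟩ := List.find?_eq_some_iff_append.mp hf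
            have hqpre : ∀ y ∈ pre ++ [L], q y = true := by
              intro y hy
              rw [List.mem_append] at hy
              rw [hqle]
              rcases hy with hy | hy
              · have : PySem.Str.len L ≤ PySem.Str.len y := by
                  rw [hsd] at hpw
                  have := (List.pairwise_append.mp hpw).2.2 y hy L (List.mem_cons_self ..)
                  exact this
                omega
              · simp at hy; subst hy; omega
            have hsd' : s = (pre ++ [L]) ++ suf := by simp [hsd]
            rw [hsd', takeWhile_append_all q _ _ hqpre, List.find?_append, List.find?_append]
            have hprenone : pre.find? (valid sym) = none := by
              rw [List.find?_eq_none]; intro a ha; simpa using hpre a ha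
            rw [hprenone]
            rw [List.find?_cons_of_pos hvL]
            simp
    · -- x not valid: nothing changes
      simp only [Bool.not_eq_true] at hvx
      have hvx' := hvx; simp only [valid] at hvx'
      have hstep : ltStep sym L x = L := by simp [ltStep, hvx']
      rw [hstep]
      refine ⟨?_, ?_⟩
      · intro y hy hvy
        rw [PySem.List.mem_insertBy] at hy
        rcases hy with rfl | hy
        · rw [valid] at hvy; rw [hvy] at hvx'; cases hvx'
        · exact ih1 y hy hvy
      · rw [fv_eq_find?] at ih2 ⊢
        rw [hsplit, List.find?_append]
        have hxnone : (x :: s.dropWhile q).find? (valid sym) = (s.dropWhile q).find? (valid sym) := by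
          exact List.find?_cons_of_neg (by simp [hvx])
        rw [hxnone, ← List.find?_append, List.takeWhile_append_dropWhile]
        exact ih2

theorem ltMain (symbols : PySem.Set Char) (ts : List String) :
    ltFirstValid symbols (PySem.List.sorted ts PySem.Str.len true) =
      ts.foldl (fun longest term =>
        if PySem.Set.issubset (PySem.Set.ofList term.toList) symbols then
          if PySem.Str.len longest < PySem.Str.len term then term else longest
        else longest) "" :=
  (ltInv symbols ts).2

-- ===== VERDICT (by name: the statement is the Claim_ definition above) =====
theorem longest_term_spec : Claim_equal_longest_term := by
  intro t n _
  unfold Spec_longest_term longest_term longest_term_alt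
  exact (ltMain _ _).symm
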